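-- pv_equiv track=rewrite | github.com/Kalessia/RP_WordleMind | tools.py | cptCorrectsChars
-- ===== SOURCE A (Python) =====
-- def cptCorrectsChars(word, secretWord):
--     cptRightPos = 0
--     cptBadPos = 0
--
--     word_check = list(word)
--     secretWord_check = list(secretWord)
--
--     tmp = []
--     for pos in range(len(word_check)):
--         if word_check[pos] == secretWord_check[pos]:
--             cptRightPos += 1
--             tmp.append(word_check[pos])
--
--     if len(tmp) > 0:
--         for pos in tmp:
--             word_check.remove(pos)
--             secretWord_check.remove(pos)
--
--     for letter in word_check:
--         if letter in secretWord_check: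
--             cptBadPos += 1
--             secretWord_check.remove(letter)
--
--     return cptRightPos, cptBadPos
-- ===== SOURCE B (Python) =====
-- def cptCorrectsChars(word, secretWord):
--     exact = 0
--     for i in range(len(word)):
--         if word[i] == secretWord[i]:
--             exact += 1
--     common = sum(min(word.count(c), secretWord.count(c)) for c in set(word))
--     return exact, common - exact
-- ===== Notes on version B (the rewrite author's own statement) =====
-- stated objective: faster
-- what changed: Replaces A's remove-exact-matches-then-greedy-rescan-with-removals passes by one positional loop for exact matches plus a frequency intersection (sum over set(word) of min of the two letter counts), returning (exact, common - exact).
import Mathlib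
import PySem

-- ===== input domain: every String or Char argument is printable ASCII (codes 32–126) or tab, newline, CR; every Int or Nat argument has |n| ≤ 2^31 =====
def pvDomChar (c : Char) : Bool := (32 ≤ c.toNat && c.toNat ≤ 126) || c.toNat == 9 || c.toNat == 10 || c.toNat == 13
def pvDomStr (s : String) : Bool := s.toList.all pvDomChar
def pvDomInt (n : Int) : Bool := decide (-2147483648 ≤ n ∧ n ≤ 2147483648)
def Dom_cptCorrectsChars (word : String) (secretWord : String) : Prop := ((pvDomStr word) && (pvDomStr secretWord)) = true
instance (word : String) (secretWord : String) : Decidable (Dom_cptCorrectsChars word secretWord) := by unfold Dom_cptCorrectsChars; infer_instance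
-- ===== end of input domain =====

-- B is a simpler re-implementation: exact matches by one positional pass, misplaced letters as
-- (sum over the distinct letters of word of min of the two letter counts) minus the exact matches;
-- A's remove-exact-matches and greedy rescan-with-removals passes disappear.

-- ===== PORT A =====
def cptCorrectsChars (word : String) (secretWord : String) : List Int :=
  let word_check := word.toList
  let secretWord_check := secretWord.toList
  -- for pos in range(len(word_check)): if word_check[pos] == secretWord_check[pos]: cptRightPos += 1; tmp.append(...)
  let st := (PySem.List.pyRange 0 (PySem.List.len word_check) 1).foldl
    (fun (st : Int × List Char) pos =>
      -- word_check[pos] then secretWord_check[pos]; pyGet? = none is Python's IndexError, excluded by Pre_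
      ((PySem.List.pyGet? word_check pos).bind (fun a =>
        (PySem.List.pyGet? secretWord_check pos).map (fun b => (a, b)))).elim st
        (fun p => if p.1 = p.2 then (st.1 + 1, st.2 ++ [p.1]) else st))
    (0, [])
  let cptRightPos := st.1
  let tmp := st.2
  -- if len(tmp) > 0: for pos in tmp: word_check.remove(pos); secretWord_check.remove(pos)
  let wcsc :=
    if tmp.length > 0 then
      tmp.foldl (fun (p : List Char × List Char) c =>
        ((PySem.List.remove? p.1 c).getD p.1, (PySem.List.remove? p.2 c).getD p.2)) (word_check, secretWord_check)
    else (word_check, secretWord_check)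
  -- for letter in word_check: if letter in secretWord_check: cptBadPos += 1; secretWord_check.remove(letter)
  let st2 := wcsc.1.foldl
    (fun (st : Int × List Char) letter =>
      if letter ∈ st.2 then (st.1 + 1, (PySem.List.remove? st.2 letter).getD st.2) else st)
    (0, wcsc.2)
  [cptRightPos, st2.1]

-- ===== PORT B =====
def cptCorrectsChars_alt (word : String) (secretWord : String) : List Int :=
  let wl := word.toList
  let sl := secretWord.toList
  -- for i in range(len(word)): if word[i] == secretWord[i]: exact += 1
  let exact := (PySem.List.pyRange 0 (PySem.List.len wl) 1).foldl
    (fun (e : Int) i =>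
      -- word[i] then secretWord[i]; pyGet? = none is Python's IndexError, excluded by Pre_
      ((PySem.List.pyGet? wl i).bind (fun a =>
        (PySem.List.pyGet? sl i).map (fun b => (a, b)))).elim e
        (fun p => if p.1 = p.2 then e + 1 else e)) 0
  -- common = sum(min(word.count(c), secretWord.count(c)) for c in set(word))
  let common := (PySem.Set.ofList wl).foldl
    (fun (c : Int) ch => c + min ((PySem.List.count wl ch : Int)) ((PySem.List.count sl ch : Int))) 0
  [exact, common - exact]

-- ===== PRECONDITION & SPEC =====
-- Pre_ excludes exactly the inputs on which A raises IndexError (word longer than secretWord); B raises there too.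
def Pre_cptCorrectsChars (word : String) (secretWord : String) : Prop :=
  word.toList.length ≤ secretWord.toList.length
instance (word : String) (secretWord : String) : Decidable (Pre_cptCorrectsChars word secretWord) := by
  unfold Pre_cptCorrectsChars; infer_instance
def pvWitness_cptCorrectsChars : String × String := ("ab", "bab")

def Spec_cptCorrectsChars (word : String) (secretWord : String) (out : List Int) : Prop := out = cptCorrectsChars_alt word secretWord
instance (word : String) (secretWord : String) (out : List Int) : Decidable (Spec_cptCorrectsChars word secretWord out) := by unfold Spec_cptCorrectsChars; infer_instance

-- ===== CLAIM (what is proved, stated in full; the proofs are below) =====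
def Claim_equal_cptCorrectsChars : Prop := ∀ (word : String) (secretWord : String), Dom_cptCorrectsChars word secretWord → Pre_cptCorrectsChars word secretWord → Spec_cptCorrectsChars word secretWord (cptCorrectsChars word secretWord)

-- ===== LEMMAS AND PROOFS =====

-- the exact-match pairs, as a list (first components of the matching zip positions)
def pvMatched (wl sl : List Char) : List Char :=
  ((wl.zip sl).filter (fun p => decide (p.1 = p.2))).map Prod.fst

-- the indexed loop over range(len(wl)) is a loop over zip wl sl (when wl is not longer)
theorem pv_fold_range_zip {σ : Type} (wl sl : List Char) (g : σ → Char × Char → σ) (init : σ)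
    (h : wl.length ≤ sl.length) :
    (PySem.List.pyRange 0 (PySem.List.len wl) 1).foldl
      (fun acc i =>
        ((PySem.List.pyGet? wl i).bind (fun a =>
          (PySem.List.pyGet? sl i).map (fun b => (a, b)))).elim acc (g acc)) init
    = (wl.zip sl).foldl g init := by
  rw [PySem.List.len_eq]
  have key : ∀ (k a : Nat), wl.length - a ≤ k → ∀ (acc : σ),
      (PySem.List.pyRange (a : Int) (wl.length : Int) 1).foldl
        (fun acc i =>
          ((PySem.List.pyGet? wl i).bind (fun a =>
            (PySem.List.pyGet? sl i).map (fun b => (a, b)))).elim acc (g acc)) acc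
      = ((wl.drop a).zip (sl.drop a)).foldl g acc := by
    intro k
    induction k with
    | zero =>
      intro a ha acc
      rw [PySem.List.pyRange_one_eq_nil (by exact_mod_cast (by omega : wl.length ≤ a))]
      rw [List.drop_eq_nil_of_le (by omega)]
      simp
    | succ k ih =>
      intro a ha acc
      by_cases hlt : a < wl.length
      · have hlt2 : a < sl.length := lt_of_lt_of_le hlt h
        rw [PySem.List.pyRange_one_cons (by exact_mod_cast hlt)]
        rw [List.foldl_cons]
        have hget1 : PySem.List.pyGet? wl (a : Int) = some wl[a] := by
          rw [PySem.List.pyGet?_natCast, List.getElem?_eq_getElem hlt]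
        have hget2 : PySem.List.pyGet? sl (a : Int) = some sl[a] := by
          rw [PySem.List.pyGet?_natCast, List.getElem?_eq_getElem hlt2]
        simp only [hget1, hget2, Option.bind_some, Option.map_some, Option.elim_some]
        have hcast : (a : Int) + 1 = ((a + 1 : Nat) : Int) := by push_cast; ring
        rw [hcast, ih (a + 1) (by omega)]
        rw [List.drop_eq_getElem_cons hlt, List.drop_eq_getElem_cons hlt2]
        rfl
      · rw [PySem.List.pyRange_one_eq_nil (by exact_mod_cast (by omega : wl.length ≤ a))]
        rw [List.drop_eq_nil_of_le (by omega : wl.length ≤ a)]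
        simp
  have := key wl.length 0 (by omega) init
  simpa using this

-- snd-projection of a zip is a sublist of the right list
theorem pv_map_snd_zip_sublist (wl sl : List Char) : ((wl.zip sl).map Prod.snd).Sublist sl := by
  induction wl generalizing sl with
  | nil => simp
  | cons a wl ih =>
    cases sl with
    | nil => simp
    | cons b sl => simpa using List.Sublist.cons₂ b (ih sl)

theorem pv_matched_sublist_left (wl sl : List Char) (h : wl.length ≤ sl.length) :
    (pvMatched wl sl).Sublist wl := by
  have h1 : (((wl.zip sl).filter (fun p => decide (p.1 = p.2))).map Prod.fst).Sublist
      ((wl.zip sl).map Prod.fst) := List.Sublist.map _ List.filter_sublist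
  rw [List.map_fst_zip h] at h1
  exact h1

theorem pv_matched_sublist_right (wl sl : List Char) :
    (pvMatched wl sl).Sublist sl := by
  have he : ((wl.zip sl).filter (fun p => decide (p.1 = p.2))).map Prod.fst
      = ((wl.zip sl).filter (fun p => decide (p.1 = p.2))).map Prod.snd := by
    refine List.map_congr_left ?_
    intro p hp
    have := List.of_mem_filter hp
    simpa using this
  have h1 : (((wl.zip sl).filter (fun p => decide (p.1 = p.2))).map Prod.snd).Sublist
      ((wl.zip sl).map Prod.snd) := List.Sublist.map _ List.filter_sublist
  unfold pvMatched
  rw [he]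
  exact h1.trans (pv_map_snd_zip_sublist wl sl)

-- removing the elements of t one by one (all present) subtracts the multiset t
theorem pv_fold_remove (t : List Char) : ∀ (xs : List Char), (↑t : Multiset Char) ≤ ↑xs →
    (↑(t.foldl (fun l c => (PySem.List.remove? l c).getD l) xs) : Multiset Char) = ↑xs - ↑t := by
  induction t with
  | nil => intro xs _; simp
  | cons c t ih =>
    intro xs hle
    have hcount := Multiset.le_iff_count.mp hle
    have hc : c ∈ xs := by
      have h1 := hcount c
      simp at h1
      exact List.count_pos_iff.mp (by omega)
    rw [List.foldl_cons, PySem.List.remove?_eq_some_erase xs c hc, Option.getD_some]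
    rw [ih (xs.erase c) ?_]
    · rw [← Multiset.coe_erase]
      have h2 : (↑(c :: t) : Multiset Char) = c ::ₘ (↑t : Multiset Char) := rfl
      rw [h2, Multiset.sub_cons]
    · rw [Multiset.le_iff_count]
      intro a
      have h1 := hcount a
      rw [← Multiset.coe_erase]
      by_cases hac : a = c
      · subst hac
        rw [Multiset.count_erase_self]
        simp at h1 ⊢
        omega
      · rw [Multiset.count_erase_of_ne hac]
        simp [List.count_cons] at h1 ⊢
        omega

-- the greedy scan with removals counts the multiset intersection
theorem pv_fold_greedy (xs : List Char) : ∀ (ys : List Char) (k : Int),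
    (xs.foldl (fun (st : Int × List Char) letter =>
      if letter ∈ st.2 then (st.1 + 1, (PySem.List.remove? st.2 letter).getD st.2) else st) (k, ys)).1
    = k + (((↑xs : Multiset Char) ∩ ↑ys).card : Int) := by
  induction xs with
  | nil => intro ys k; simp
  | cons a xs ih =>
    intro ys k
    rw [List.foldl_cons]
    by_cases hmem : a ∈ ys
    · have hstep : (if a ∈ ((k : Int), ys).2 then (((k : Int), ys).1 + 1, (PySem.List.remove? ((k : Int), ys).2 a).getD ((k : Int), ys).2) else ((k : Int), ys))
          = ((k + 1 : Int), ys.erase a) := by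
        show (if a ∈ ys then ((k : Int) + 1, (PySem.List.remove? ys a).getD ys) else ((k : Int), ys)) = _
        rw [if_pos hmem, PySem.List.remove?_eq_some_erase ys a hmem, Option.getD_some]
      rw [hstep, ih (ys.erase a) (k + 1)]
      have h1 : ((↑(a :: xs) : Multiset Char) ∩ ↑ys) = a ::ₘ ((↑xs : Multiset Char) ∩ (↑ys : Multiset Char).erase a) :=
        by rw [← Multiset.cons_coe]
           exact Multiset.cons_inter_of_pos _ (Multiset.mem_coe.mpr hmem)
      rw [h1, Multiset.coe_erase, Multiset.card_cons]
      push_cast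
      ring
    · have hstep : (if a ∈ ((k : Int), ys).2 then (((k : Int), ys).1 + 1, (PySem.List.remove? ((k : Int), ys).2 a).getD ((k : Int), ys).2) else ((k : Int), ys))
          = ((k : Int), ys) := by
        show (if a ∈ ys then ((k : Int) + 1, (PySem.List.remove? ys a).getD ys) else ((k : Int), ys)) = _
        rw [if_neg hmem]
      rw [hstep, ih ys k]
      have h1 : ((↑(a :: xs) : Multiset Char) ∩ ↑ys) = (↑xs : Multiset Char) ∩ ↑ys :=
        by rw [← Multiset.cons_coe]
           exact Multiset.cons_inter_of_neg _ (fun hx => hmem (Multiset.mem_coe.mp hx))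
      rw [h1]

-- the per-letter min-count sum over the distinct letters of wl is the intersection size
theorem pv_sum_min_counts (wl sl : List Char) :
    ((PySem.Set.ofList wl).foldl
      (fun (c : Int) ch => c + min ((PySem.List.count wl ch : Int)) ((PySem.List.count sl ch : Int))) 0)
    = (((↑wl : Multiset Char) ∩ ↑sl).card : Int) := by
  rw [PySem.List.foldl_add (PySem.Set.ofList wl)
    (fun ch => min ((PySem.List.count wl ch : Int)) ((PySem.List.count sl ch : Int))) 0, zero_add]
  have hnd : (PySem.Set.ofList wl).Nodup := PySem.Set.nodup_ofList wl
  have hsum := List.sum_toFinset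
    (fun ch => min ((PySem.List.count wl ch : Int)) ((PySem.List.count sl ch : Int))) hnd
  rw [← hsum]
  have hfin : (PySem.Set.ofList wl).toFinset = wl.toFinset := by
    ext x; simp [PySem.Set.mem_ofList]
  rw [hfin]
  have hNat : ∑ c ∈ wl.toFinset, min (List.count c wl) (List.count c sl)
      = ((↑wl : Multiset Char) ∩ ↑sl).card := by
    rw [← Multiset.toFinset_sum_count_eq ((↑wl : Multiset Char) ∩ ↑sl)]
    have hsub : ((↑wl : Multiset Char) ∩ ↑sl).toFinset ⊆ wl.toFinset := by
      intro x hx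
      rw [Multiset.mem_toFinset, Multiset.mem_inter] at hx
      rw [List.mem_toFinset]
      exact_mod_cast hx.1
    rw [Finset.sum_subset hsub (by
      intro x _ hx
      rw [Multiset.count_eq_zero]
      intro hmem
      exact hx (Multiset.mem_toFinset.mpr hmem))]
    refine Finset.sum_congr rfl ?_
    intro c _
    rw [Multiset.count_inter]
    simp
  calc ∑ c ∈ wl.toFinset, min ((PySem.List.count wl c : Int)) ((PySem.List.count sl c : Int))
      = ((∑ c ∈ wl.toFinset, min (List.count c wl) (List.count c sl) : Nat) : Int) := by
        push_cast
        refine Finset.sum_congr rfl ?_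
        intro c _
        rw [PySem.List.count_eq, PySem.List.count_eq]
    _ = (((↑wl : Multiset Char) ∩ ↑sl).card : Int) := by rw [hNat]

-- subtracting a common sub-multiset commutes with intersection
theorem pv_sub_inter_sub (s t u : Multiset Char) :
    (s - u) ∩ (t - u) = s ∩ t - u := by
  ext a
  rw [Multiset.count_inter, Multiset.count_sub, Multiset.count_sub, Multiset.count_sub,
    Multiset.count_inter, Nat.sub_min_sub_right]

-- the first loop of A accumulates (number of matches, the matched letters)
theorem pv_foldA (wl sl : List Char) (h : wl.length ≤ sl.length) :
    ((PySem.List.pyRange 0 (PySem.List.len wl) 1).foldl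
      (fun (st : Int × List Char) pos =>
        ((PySem.List.pyGet? wl pos).bind (fun a =>
          (PySem.List.pyGet? sl pos).map (fun b => (a, b)))).elim st
          (fun p => if p.1 = p.2 then (st.1 + 1, st.2 ++ [p.1]) else st)) ((0 : Int), ([] : List Char)))
    = (((pvMatched wl sl).length : Int), pvMatched wl sl) := by
  have h0 := pv_fold_range_zip wl sl
    (fun (st : Int × List Char) (p : Char × Char) => if p.1 = p.2 then (st.1 + 1, st.2 ++ [p.1]) else st)
    ((0 : Int), ([] : List Char)) h
  refine Eq.trans h0 ?_
  have hg : (fun (st : Int × List Char) (p : Char × Char) => if p.1 = p.2 then (st.1 + 1, st.2 ++ [p.1]) else st)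
      = (fun (st : Int × List Char) (p : Char × Char) =>
          ((fun (x : Int) (p : Char × Char) => if p.1 = p.2 then x + 1 else x) st.1 p,
           (fun (x : List Char) (p : Char × Char) => if p.1 = p.2 then x ++ [p.1] else x) st.2 p)) := by
    funext st p
    by_cases hp : p.1 = p.2 <;> simp [hp]
  rw [hg, PySem.List.foldl_prod_mk
    (f := fun (x : Int) (p : Char × Char) => if p.1 = p.2 then x + 1 else x)
    (g := fun (x : List Char) (p : Char × Char) => if p.1 = p.2 then x ++ [p.1] else x)]
  rw [PySem.List.foldl_ite_add_one, PySem.List.foldl_append_ite]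
  unfold pvMatched
  rw [zero_add, List.nil_append]
  congr 1
  rw [List.countP_eq_length_filter, List.length_map]

theorem pv_foldB (wl sl : List Char) (h : wl.length ≤ sl.length) :
    ((PySem.List.pyRange 0 (PySem.List.len wl) 1).foldl
      (fun (e : Int) i =>
        ((PySem.List.pyGet? wl i).bind (fun a =>
          (PySem.List.pyGet? sl i).map (fun b => (a, b)))).elim e
          (fun p => if p.1 = p.2 then e + 1 else e)) (0 : Int))
    = ((pvMatched wl sl).length : Int) := by
  have h0 := pv_fold_range_zip wl sl
    (fun (e : Int) (p : Char × Char) => if p.1 = p.2 then e + 1 else e) (0 : Int) h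
  refine Eq.trans h0 ?_
  rw [PySem.List.foldl_ite_add_one, zero_add]
  unfold pvMatched
  rw [List.countP_eq_length_filter, List.length_map]

-- ===== VERDICT (by name: the statement is the Claim_ definition above) =====
theorem cptCorrectsChars_spec : Claim_equal_cptCorrectsChars := by
  intro word secretWord _ hpre
  unfold Pre_cptCorrectsChars at hpre
  unfold Spec_cptCorrectsChars cptCorrectsChars cptCorrectsChars_alt
  simp only []
  set wl := word.toList with hwl
  set sl := secretWord.toList with hsl
  rw [pv_foldA wl sl hpre, pv_foldB wl sl hpre, pv_sum_min_counts wl sl]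
  set m := pvMatched wl sl with hm
  have hle1 : (↑m : Multiset Char) ≤ ↑wl :=
    Multiset.coe_le.mpr (pv_matched_sublist_left wl sl hpre).subperm
  have hle2 : (↑m : Multiset Char) ≤ ↑sl :=
    Multiset.coe_le.mpr (pv_matched_sublist_right wl sl).subperm
  have hle3 : (↑m : Multiset Char) ≤ (↑wl : Multiset Char) ∩ ↑sl := Multiset.le_inter hle1 hle2
  have hcard : m.length ≤ ((↑wl : Multiset Char) ∩ ↑sl).card := by
    have := Multiset.card_le_card hle3
    simpa using this
  -- reduce the second pass to a multiset computation
  have hpair : ∀ (wc sc : List Char), (↑wc : Multiset Char) = ↑wl - ↑m → (↑sc : Multiset Char) = ↑sl - ↑m →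
      (wc.foldl (fun (st : Int × List Char) letter =>
        if letter ∈ st.2 then (st.1 + 1, (PySem.List.remove? st.2 letter).getD st.2) else st) ((0 : Int), sc)).1
      = ((((↑wl : Multiset Char) ∩ ↑sl).card : Int)) - (m.length : Int) := by
    intro wc sc hwc hsc
    rw [pv_fold_greedy wc sc 0, zero_add, hwc, hsc, pv_sub_inter_sub,
      Multiset.card_sub hle3]
    have : ((↑m : Multiset Char)).card = m.length := by simp
    rw [this, Nat.cast_sub hcard]
  by_cases hm0 : m.length > 0
  · rw [if_pos hm0]
    have hsplit : m.foldl (fun (p : List Char × List Char) c =>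
        ((PySem.List.remove? p.1 c).getD p.1, (PySem.List.remove? p.2 c).getD p.2)) (wl, sl)
        = (m.foldl (fun l c => (PySem.List.remove? l c).getD l) wl,
           m.foldl (fun l c => (PySem.List.remove? l c).getD l) sl) :=
      PySem.List.foldl_prod_mk (f := fun l c => (PySem.List.remove? l c).getD l)
        (g := fun l c => (PySem.List.remove? l c).getD l) m wl sl
    rw [hsplit]
    rw [hpair _ _ (pv_fold_remove m wl hle1) (pv_fold_remove m sl hle2)]
  · rw [if_neg hm0]
    have hmnil : m = [] := List.length_eq_zero_iff.mp (by omega)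
    rw [hpair wl sl (by rw [hmnil]; simp) (by rw [hmnil]; simp)]
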